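-- pv_equiv track=rewrite | github.com/Enterprise-GraphRAG-Study/Enterprise-Commodities-GraphRAG-Dave | src/indexer.py | build_entity_to_evidence_index
-- ===== SOURCE A (Python) =====
-- from collections import defaultdict
-- from typing import Any
--
-- def build_entity_to_evidence_index(
--     relationships: list[dict[str, Any]],
--     node_index: dict[str, dict[str, Any]],
-- ) -> dict[str, dict[str, list[str]]]:
--     """Map entity IDs to related claim, document, observation, and event evidence."""
--     claim_to_document: dict[str, str] = {}
--     claim_to_entities: dict[str, list[str]] = defaultdict(list)
--     claim_to_events: dict[str, list[str]] = defaultdict(list)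
--     entity_to_observations: dict[str, list[str]] = defaultdict(list)
--
--     for rel in relationships:
--         rel_type = str(rel.get("type", ""))
--         src = str(rel.get("from", ""))
--         dst = str(rel.get("to", ""))
--         if rel_type == "SUPPORTS" and src.startswith("DOC:") and dst.startswith("CLM:"):
--             claim_to_document[dst] = src
--         elif rel_type == "ABOUT" and src.startswith("CLM:"):
--             claim_to_entities[src].append(dst)
--             if dst.startswith("EV:"):
--                 claim_to_events[src].append(dst)
--         elif rel_type == "OF" and src.startswith("OBS:"):
--             entity_to_observations[dst].append(src)
--
--     entity_to_evidence: dict[str, dict[str, list[str]]] = {}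
--     for node_id in node_index:
--         entity_to_evidence[node_id] = {
--             "claims": [],
--             "documents": [],
--             "observations": sorted(set(entity_to_observations.get(node_id, []))),
--             "events": [],
--         }
--
--     for claim_id, entity_ids in claim_to_entities.items():
--         for entity_id in entity_ids:
--             if entity_id not in entity_to_evidence:
--                 continue
--             entity_to_evidence[entity_id]["claims"].append(claim_id)
--             if claim_id in claim_to_document:
--                 entity_to_evidence[entity_id]["documents"].append(claim_to_document[claim_id])
--             entity_to_evidence[entity_id]["events"].extend(claim_to_events.get(claim_id, []))
--
--     for payload in entity_to_evidence.values():
--         payload["claims"] = sorted(set(payload["claims"]))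
--         payload["documents"] = sorted(set(payload["documents"]))
--         payload["events"] = sorted(set(payload["events"]))
--
--     return entity_to_evidence
-- ===== SOURCE B (Python) =====
-- def build_entity_to_evidence_index(relationships, node_index):
--     """Dict-free staged rebuild: classify relationships into flat lists by comprehension, then derive each node's payload by direct scans."""
--     triples = [(str(r.get("type", "")), str(r.get("from", "")), str(r.get("to", "")))
--                for r in relationships]
--     doc_of = {d: s for (t, s, d) in triples
--               if t == "SUPPORTS" and s.startswith("DOC:") and d.startswith("CLM:")}
--     about = [(s, d) for (t, s, d) in triples if t == "ABOUT" and s.startswith("CLM:")]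
--     obs = [(d, s) for (t, s, d) in triples if t == "OF" and s.startswith("OBS:")]
--     result = {}
--     for nid in node_index:
--         claims = [c for (c, e) in about if e == nid]
--         result[nid] = {
--             "claims": sorted(set(claims)),
--             "documents": sorted({doc_of[c] for c in claims if c in doc_of}),
--             "observations": sorted({o for (e, o) in obs if e == nid}),
--             "events": sorted({d for c in claims
--                               for (s, d) in about if s == c and d.startswith("EV:")}),
--         }
--     return result
-- ===== Notes on version B (the rewrite author's own statement) =====
-- stated objective: simpler
-- what changed: B replaces A's four defaultdict accumulators and three mutation passes (skeleton build, claim-driven in-place aggregation, in-place sort pass) with a dict-free staged form: comprehensions classify the relationships into three flat lists/maps once, and each node's complete payload is then derived by direct scans of those lists.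
import Mathlib
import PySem

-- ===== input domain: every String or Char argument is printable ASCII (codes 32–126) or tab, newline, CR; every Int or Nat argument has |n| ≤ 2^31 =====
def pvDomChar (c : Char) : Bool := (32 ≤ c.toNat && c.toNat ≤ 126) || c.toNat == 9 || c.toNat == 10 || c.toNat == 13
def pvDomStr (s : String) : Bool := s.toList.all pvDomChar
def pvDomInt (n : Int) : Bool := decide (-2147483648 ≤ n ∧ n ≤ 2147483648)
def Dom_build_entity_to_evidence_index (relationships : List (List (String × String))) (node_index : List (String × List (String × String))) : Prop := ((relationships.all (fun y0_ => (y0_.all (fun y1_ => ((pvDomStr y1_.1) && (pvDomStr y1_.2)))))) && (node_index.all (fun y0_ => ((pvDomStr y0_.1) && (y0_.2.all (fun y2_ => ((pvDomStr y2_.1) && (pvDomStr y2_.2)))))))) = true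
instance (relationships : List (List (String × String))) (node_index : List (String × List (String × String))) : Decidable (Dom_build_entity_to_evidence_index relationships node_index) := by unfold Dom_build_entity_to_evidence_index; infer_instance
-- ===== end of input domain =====

-- B replaces A's defaultdict accumulators and three mutation passes by a dict-free staged form:
-- comprehension-style passes classify the relationships into three flat lists/maps once, and each
-- node's payload is then derived by direct scans of those lists (objective: simpler decomposition).

-- sorted(set(xs)) for strings (shared by both ports, as by both Pythons)
def pvSortedSet (l : List String) : List String :=
  PySem.List.sorted (PySem.Set.ofList l) (fun x => x) false

-- str(rel.get("type", "")) etc. (A-side field readers)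
def pvRelType (rel : List (String × String)) : String := (PySem.Dict.mk rel).getD "type" ""
def pvRelFrom (rel : List (String × String)) : String := (PySem.Dict.mk rel).getD "from" ""
def pvRelTo (rel : List (String × String)) : String := (PySem.Dict.mk rel).getD "to" ""

-- ===== PORT A =====
def build_entity_to_evidence_index (relationships : List (List (String × String))) (node_index : List (String × List (String × String))) : List (String × List (String × List String)) :=
  -- first loop: four dicts built over relationships (claim→document, claim→entities, claim→events, entity→observations)
  let st := relationships.foldl (fun (s : PySem.Dict String String × PySem.Dict String (List String) × PySem.Dict String (List String) × PySem.Dict String (List String)) rel =>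
    let rel_type := pvRelType rel
    let src := pvRelFrom rel
    let dst := pvRelTo rel
    if rel_type == "SUPPORTS" && PySem.Str.startswith src "DOC:" && PySem.Str.startswith dst "CLM:" then
      (s.1.insert dst src, s.2.1, s.2.2.1, s.2.2.2)
    else if rel_type == "ABOUT" && PySem.Str.startswith src "CLM:" then
      (s.1, s.2.1.modify src [] (· ++ [dst]),
        (if PySem.Str.startswith dst "EV:" then s.2.2.1.modify src [] (· ++ [dst]) else s.2.2.1),
        s.2.2.2)
    else if rel_type == "OF" && PySem.Str.startswith src "OBS:" then
      (s.1, s.2.1, s.2.2.1, s.2.2.2.modify dst [] (· ++ [src]))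
    else s)
    (PySem.Dict.empty, PySem.Dict.empty, PySem.Dict.empty, PySem.Dict.empty)
  let claim_to_document := st.1
  let claim_to_entities := st.2.1
  let claim_to_events := st.2.2.1
  let entity_to_observations := st.2.2.2
  -- second loop: skeleton payload for every node id
  let ev0 := node_index.foldl (fun (ev : PySem.Dict String (PySem.Dict String (List String))) p =>
    ev.insert p.1 (PySem.Dict.mk
      [("claims", []), ("documents", []),
       ("observations", pvSortedSet (entity_to_observations.getD p.1 [])), ("events", [])]))
    PySem.Dict.empty
  -- third loop: claim-driven aggregation (in-place mutation of the payload ported as read-update-insert)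
  let ev1 := claim_to_entities.items.foldl (fun ev pr =>
    pr.2.foldl (fun ev e =>
      if ev.contains e then
        let pl := ev.getD e PySem.Dict.empty
        let pl := pl.modify "claims" [] (· ++ [pr.1])
        let pl := if claim_to_document.contains pr.1 then
            pl.modify "documents" [] (· ++ [claim_to_document.getD pr.1 ""]) else pl
        let pl := pl.modify "events" [] (· ++ claim_to_events.getD pr.1 [])
        ev.insert e pl
      else ev) ev) ev0
  -- fourth loop: sorted(set(...)) applied to each payload value in place
  ev1.items.map (fun p =>
    (p.1, (((p.2.insert "claims" (pvSortedSet (p.2.getD "claims" []))).insert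
              "documents" (pvSortedSet (p.2.getD "documents" []))).insert
              "events" (pvSortedSet (p.2.getD "events" []))).items))

-- ===== PORT B =====
def build_entity_to_evidence_index_alt (relationships : List (List (String × String))) (node_index : List (String × List (String × String))) : List (String × List (String × List String)) :=
  -- comprehension passes: the (type, from, to) triples, and their three classifications
  let triples := relationships.map (fun r =>
    ((PySem.Dict.mk r).getD "type" "", (PySem.Dict.mk r).getD "from" "", (PySem.Dict.mk r).getD "to" ""))
  let doc_of := (triples.filter (fun t =>
      t.1 == "SUPPORTS" && PySem.Str.startswith t.2.1 "DOC:" && PySem.Str.startswith t.2.2 "CLM:")).foldl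
    (fun (d : PySem.Dict String String) t => d.insert t.2.2 t.2.1) PySem.Dict.empty
  let about := triples.filterMap (fun t =>
    if t.1 == "ABOUT" && PySem.Str.startswith t.2.1 "CLM:" then some (t.2.1, t.2.2) else none)
  let obs := triples.filterMap (fun t =>
    if t.1 == "OF" && PySem.Str.startswith t.2.1 "OBS:" then some (t.2.2, t.2.1) else none)
  -- one pass over the nodes: each payload is read off the flat lists directly
  let result := node_index.foldl (fun (res : PySem.Dict String (List (String × List String))) p =>
    let claims := about.filterMap (fun q => if q.2 == p.1 then some q.1 else none)
    res.insert p.1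
      [("claims", pvSortedSet claims),
       ("documents", pvSortedSet ((claims.filter (fun c => doc_of.contains c)).map (fun c => doc_of.getD c ""))),
       ("observations", pvSortedSet (obs.filterMap (fun q => if q.1 == p.1 then some q.2 else none))),
       ("events", pvSortedSet (claims.flatMap (fun c =>
         about.filterMap (fun q => if q.1 == c && PySem.Str.startswith q.2 "EV:" then some q.2 else none))))])
    PySem.Dict.empty
  result.items

-- ===== PRECONDITION & SPEC =====
def Spec_build_entity_to_evidence_index (relationships : List (List (String × String))) (node_index : List (String × List (String × String))) (out : List (String × List (String × List String))) : Prop := out = build_entity_to_evidence_index_alt relationships node_index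
instance (relationships : List (List (String × String))) (node_index : List (String × List (String × String))) (out : List (String × List (String × List String))) : Decidable (Spec_build_entity_to_evidence_index relationships node_index out) := by unfold Spec_build_entity_to_evidence_index; infer_instance

-- ===== CLAIM (what is proved, stated in full; the proofs are below) =====
def Claim_equal_build_entity_to_evidence_index : Prop := ∀ (relationships : List (List (String × String))) (node_index : List (String × List (String × String))), Dom_build_entity_to_evidence_index relationships node_index → Spec_build_entity_to_evidence_index relationships node_index (build_entity_to_evidence_index relationships node_index)

-- ===== LEMMAS AND PROOFS =====

-- branch conditions of A's relationship loop
def pvC1 (rel : List (String × String)) : Bool :=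
  (pvRelType rel == "SUPPORTS") && PySem.Str.startswith (pvRelFrom rel) "DOC:" && PySem.Str.startswith (pvRelTo rel) "CLM:"
def pvC2 (rel : List (String × String)) : Bool :=
  (pvRelType rel == "ABOUT") && PySem.Str.startswith (pvRelFrom rel) "CLM:"
def pvC3 (rel : List (String × String)) : Bool :=
  (pvRelType rel == "OF") && PySem.Str.startswith (pvRelFrom rel) "OBS:"

-- single-dict views of A's relationship loop
def pvG1 (d : PySem.Dict String String) (rel : List (String × String)) : PySem.Dict String String :=
  if pvC1 rel then d.insert (pvRelTo rel) (pvRelFrom rel) else d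
def pvG2 (d : PySem.Dict String (List String)) (rel : List (String × String)) : PySem.Dict String (List String) :=
  if pvC1 rel then d else if pvC2 rel then d.modify (pvRelFrom rel) [] (· ++ [pvRelTo rel]) else d
def pvG3 (d : PySem.Dict String (List String)) (rel : List (String × String)) : PySem.Dict String (List String) :=
  if pvC1 rel then d else if pvC2 rel then
    (if PySem.Str.startswith (pvRelTo rel) "EV:" then d.modify (pvRelFrom rel) [] (· ++ [pvRelTo rel]) else d)
  else d
def pvG4 (d : PySem.Dict String (List String)) (rel : List (String × String)) : PySem.Dict String (List String) :=
  if pvC1 rel then d else if pvC2 rel then d else if pvC3 rel then d.modify (pvRelTo rel) [] (· ++ [pvRelFrom rel]) else d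

def pvC2D (rels : List (List (String × String))) : PySem.Dict String String := rels.foldl pvG1 PySem.Dict.empty
def pvC2E (rels : List (List (String × String))) : PySem.Dict String (List String) := rels.foldl pvG2 PySem.Dict.empty
def pvC2EV (rels : List (List (String × String))) : PySem.Dict String (List String) := rels.foldl pvG3 PySem.Dict.empty
def pvE2O (rels : List (List (String × String))) : PySem.Dict String (List String) := rels.foldl pvG4 PySem.Dict.empty

-- the claim→entities pairs A's third loop walks, and the claims it selects for one entity
def pvOps (rels : List (List (String × String))) : List (String × String) :=
  (pvC2E rels).items.flatMap (fun pr => pr.2.map (fun e => (pr.1, e)))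
def pvSel (rels : List (List (String × String))) (k : String) : List String :=
  (pvOps rels).filterMap (fun q => if q.2 = k then some q.1 else none)

-- A's per-entity payload update / skeleton
def pvUpd (c2d : PySem.Dict String String) (c2ev : PySem.Dict String (List String)) (c : String) (pl : PySem.Dict String (List String)) : PySem.Dict String (List String) :=
  let pl := pl.modify "claims" [] (· ++ [c])
  let pl := if c2d.contains c then pl.modify "documents" [] (· ++ [c2d.getD c ""]) else pl
  pl.modify "events" [] (· ++ c2ev.getD c [])
def pvStep3 (c2d : PySem.Dict String String) (c2ev : PySem.Dict String (List String)) (ev : PySem.Dict String (PySem.Dict String (List String))) (q : String × String) : PySem.Dict String (PySem.Dict String (List String)) :=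
  if ev.contains q.2 then ev.insert q.2 (pvUpd c2d c2ev q.1 (ev.getD q.2 PySem.Dict.empty)) else ev
def pvPayload (cs ds os es : List String) : PySem.Dict String (List String) :=
  PySem.Dict.mk [("claims", cs), ("documents", ds), ("observations", os), ("events", es)]
def pvInitP (rels : List (List (String × String))) (k : String) : PySem.Dict String (List String) :=
  pvPayload [] [] (pvSortedSet ((pvE2O rels).getD k [])) []

-- B-side named pieces (in the port's exact shape, so the characterization is definitional)
def pvTriples (rels : List (List (String × String))) : List (String × String × String) :=
  rels.map (fun r => ((PySem.Dict.mk r).getD "type" "", (PySem.Dict.mk r).getD "from" "", (PySem.Dict.mk r).getD "to" ""))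
def pvDocOfB (rels : List (List (String × String))) : PySem.Dict String String :=
  ((pvTriples rels).filter (fun t =>
      t.1 == "SUPPORTS" && PySem.Str.startswith t.2.1 "DOC:" && PySem.Str.startswith t.2.2 "CLM:")).foldl
    (fun d t => d.insert t.2.2 t.2.1) PySem.Dict.empty
def pvAboutB (rels : List (List (String × String))) : List (String × String) :=
  (pvTriples rels).filterMap (fun t =>
    if t.1 == "ABOUT" && PySem.Str.startswith t.2.1 "CLM:" then some (t.2.1, t.2.2) else none)
def pvObsB (rels : List (List (String × String))) : List (String × String) :=
  (pvTriples rels).filterMap (fun t =>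
    if t.1 == "OF" && PySem.Str.startswith t.2.1 "OBS:" then some (t.2.2, t.2.1) else none)
def pvClaimsB (rels : List (List (String × String))) (k : String) : List String :=
  (pvAboutB rels).filterMap (fun q => if q.2 == k then some q.1 else none)
def pvValB (rels : List (List (String × String))) (k : String) : List (String × List String) :=
  [("claims", pvSortedSet (pvClaimsB rels k)),
   ("documents", pvSortedSet (((pvClaimsB rels k).filter (fun c => (pvDocOfB rels).contains c)).map (fun c => (pvDocOfB rels).getD c ""))),
   ("observations", pvSortedSet ((pvObsB rels).filterMap (fun q => if q.1 == k then some q.2 else none))),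
   ("events", pvSortedSet ((pvClaimsB rels k).flatMap (fun c =>
     (pvAboutB rels).filterMap (fun q => if q.1 == c && PySem.Str.startswith q.2 "EV:" then some q.2 else none))))]

-- the four-accumulator relationship loop of port A is its four single-dict loops
lemma pv_foldl_relsA (l : List (List (String × String)))
    (s : PySem.Dict String String × PySem.Dict String (List String) × PySem.Dict String (List String) × PySem.Dict String (List String)) :
    l.foldl (fun (s : PySem.Dict String String × PySem.Dict String (List String) × PySem.Dict String (List String) × PySem.Dict String (List String)) rel =>
      let rel_type := pvRelType rel
      let src := pvRelFrom rel
      let dst := pvRelTo rel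
      if rel_type == "SUPPORTS" && PySem.Str.startswith src "DOC:" && PySem.Str.startswith dst "CLM:" then
        (s.1.insert dst src, s.2.1, s.2.2.1, s.2.2.2)
      else if rel_type == "ABOUT" && PySem.Str.startswith src "CLM:" then
        (s.1, s.2.1.modify src [] (· ++ [dst]),
          (if PySem.Str.startswith dst "EV:" then s.2.2.1.modify src [] (· ++ [dst]) else s.2.2.1),
          s.2.2.2)
      else if rel_type == "OF" && PySem.Str.startswith src "OBS:" then
        (s.1, s.2.1, s.2.2.1, s.2.2.2.modify dst [] (· ++ [src]))
      else s) s
    = (l.foldl pvG1 s.1, l.foldl pvG2 s.2.1, l.foldl pvG3 s.2.2.1, l.foldl pvG4 s.2.2.2) := by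
  induction l generalizing s with
  | nil => rfl
  | cons rel t ih =>
    simp only [List.foldl_cons]
    rw [ih]
    have hc : ∀ (s : PySem.Dict String String × PySem.Dict String (List String) × PySem.Dict String (List String) × PySem.Dict String (List String)),
        (if pvRelType rel == "SUPPORTS" && PySem.Str.startswith (pvRelFrom rel) "DOC:" && PySem.Str.startswith (pvRelTo rel) "CLM:" then
          (s.1.insert (pvRelTo rel) (pvRelFrom rel), s.2.1, s.2.2.1, s.2.2.2)
        else if pvRelType rel == "ABOUT" && PySem.Str.startswith (pvRelFrom rel) "CLM:" then
          (s.1, s.2.1.modify (pvRelFrom rel) [] (· ++ [pvRelTo rel]),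
            (if PySem.Str.startswith (pvRelTo rel) "EV:" then s.2.2.1.modify (pvRelFrom rel) [] (· ++ [pvRelTo rel]) else s.2.2.1),
            s.2.2.2)
        else if pvRelType rel == "OF" && PySem.Str.startswith (pvRelFrom rel) "OBS:" then
          (s.1, s.2.1, s.2.2.1, s.2.2.2.modify (pvRelTo rel) [] (· ++ [pvRelFrom rel]))
        else s)
        = (pvG1 s.1 rel, pvG2 s.2.1 rel, pvG3 s.2.2.1 rel, pvG4 s.2.2.2 rel) := by
      intro s
      simp only [pvG1, pvG2, pvG3, pvG4, pvC1, pvC2, pvC3]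
      split_ifs <;> rfl
    rw [hc s]

-- pvG2 keeps dict keys without duplicates
lemma pv_nodup_g2 : ∀ (l : List (List (String × String))) (d : PySem.Dict String (List String)),
    d.keys.Nodup → (l.foldl pvG2 d).keys.Nodup := by
  intro l
  induction l with
  | nil => intro d h; exact h
  | cons rel t ih =>
    intro d h
    simp only [List.foldl_cons]
    apply ih
    unfold pvG2
    split_ifs with h1 h2
    · exact h
    · rw [PySem.Dict.keys_modify]
      by_cases hc : d.contains (pvRelFrom rel)
      · rwa [PySem.Dict.keys_insert_of_contains _ _ hc]
      · rw [PySem.Dict.keys_insert_of_not_contains _ _ (by simpa using hc)]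
        rw [List.nodup_append]
        refine ⟨h, List.nodup_singleton _, ?_⟩
        intro a ha b hb
        rw [List.mem_singleton] at hb
        subst hb
        exact fun hab => hc ((PySem.Dict.contains_iff_mem_keys _ _).2 (hab ▸ ha))
    · exact h

-- getD / items of a fold that inserts a key-determined value
lemma pv_getD_insertKeyFold {β ν : Type} (key : β → String) (v : String → ν) :
    ∀ (l : List β) (d : PySem.Dict String ν) (k : String) (dflt : ν),
    (l.foldl (fun d x => d.insert (key x) (v (key x))) d).getD k dflt
      = if k ∈ l.map key then v k else d.getD k dflt := by
  intro l
  induction l with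
  | nil => simp
  | cons a t ih =>
    intro d k dflt
    simp only [List.foldl_cons, List.map_cons, List.mem_cons]
    rw [ih, PySem.Dict.getD_insert]
    by_cases h1 : k ∈ t.map key <;> by_cases h2 : k = key a <;> simp [h1, h2]

lemma pv_items_insertKeyFold {β ν : Type} (l : List β) (key : β → String) (v : String → ν) (dflt : ν) :
    (l.foldl (fun d x => d.insert (key x) (v (key x))) PySem.Dict.empty).items
      = (PySem.Set.ofList (l.map key)).map (fun k => (k, v k)) := by
  have hkeys : (l.foldl (fun d x => d.insert (key x) (v (key x))) PySem.Dict.empty).keys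
      = PySem.Set.ofList (l.map key) := by
    rw [PySem.Dict.keys_foldl_insert_key l key (fun d x => v (key x))]
    rfl
  have hnd : (l.foldl (fun d x => d.insert (key x) (v (key x))) PySem.Dict.empty).keys.Nodup := by
    rw [hkeys]; exact PySem.Set.nodup_ofList _
  rw [PySem.Dict.items_eq_map_keys _ hnd dflt, hkeys]
  apply List.map_congr_left
  intro k hk
  have hk' : k ∈ l.map key := (PySem.Set.mem_ofList _ _).1 hk
  rw [pv_getD_insertKeyFold, if_pos hk']

-- the nested third loop of A is a fold over the flattened (claim, entity) pairs
lemma pv_foldl_pairfold {σ α β : Type} (l : List (α × List β)) (h : σ → α × β → σ) (s : σ) :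
    l.foldl (fun s pr => pr.2.foldl (fun s e => h s (pr.1, e)) s) s
      = (l.flatMap (fun pr => pr.2.map (fun e => (pr.1, e)))).foldl h s := by
  induction l generalizing s with
  | nil => rfl
  | cons pr t ih => simp [List.foldl_append, List.foldl_map, ih]

-- one pvStep3 on a key-indexed dict is a pointwise update
lemma pv_step3_mk (c2d : PySem.Dict String String) (c2ev : PySem.Dict String (List String))
    (keys : List String) (g : String → PySem.Dict String (List String)) (hnd : keys.Nodup) (q : String × String) :
    pvStep3 c2d c2ev (PySem.Dict.mk (keys.map (fun k => (k, g k)))) q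
      = PySem.Dict.mk (keys.map (fun k => (k, if k = q.2 then pvUpd c2d c2ev q.1 (g q.2) else g k))) := by
  have hkeys : (PySem.Dict.mk (keys.map (fun k => (k, g k)))).keys = keys := by
    rw [PySem.Dict.keys_mk, List.map_map]
    simp [Function.comp_def]
  by_cases hk : q.2 ∈ keys
  · have hcont : (PySem.Dict.mk (keys.map (fun k => (k, g k)))).contains q.2 = true := by
      rw [PySem.Dict.contains_iff_mem_keys, hkeys]; exact hk
    have hgd : (PySem.Dict.mk (keys.map (fun k => (k, g k)))).getD q.2 PySem.Dict.empty = g q.2 := by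
      refine PySem.Dict.getD_of_mem_items _ ?_ (by rw [hkeys]; exact hnd) _
      exact List.mem_map.2 ⟨q.2, hk, rfl⟩
    unfold pvStep3
    rw [if_pos hcont]
    apply PySem.Dict.ext
    rw [PySem.Dict.items_insert_of_contains _ _ hcont]
    show (keys.map (fun k => (k, g k))).map _ = _
    rw [List.map_map]
    apply List.map_congr_left
    intro k _
    by_cases hke : k = q.2
    · subst hke; simp [hgd]
    · simp [hke]
  · have hcont : (PySem.Dict.mk (keys.map (fun k => (k, g k)))).contains q.2 = false := by
      rw [← Bool.not_eq_true, PySem.Dict.contains_iff_mem_keys, hkeys]; exact hk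
    unfold pvStep3
    rw [if_neg (by simp [hcont])]
    congr 1
    apply List.map_congr_left
    intro k hkk
    have : k ≠ q.2 := fun hEq => hk (hEq ▸ hkk)
    simp [this]

-- the whole third loop, entity by entity
lemma pv_mapfold (c2d : PySem.Dict String String) (c2ev : PySem.Dict String (List String)) :
    ∀ (ops : List (String × String)) (keys : List String) (g : String → PySem.Dict String (List String)), keys.Nodup →
    ops.foldl (pvStep3 c2d c2ev) (PySem.Dict.mk (keys.map (fun k => (k, g k))))
      = PySem.Dict.mk (keys.map (fun k => (k,
          (ops.filterMap (fun q => if q.2 = k then some q.1 else none)).foldl (fun pl c => pvUpd c2d c2ev c pl) (g k)))) := by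
  intro ops
  induction ops with
  | nil => intro keys g _; simp
  | cons q t ih =>
    intro keys g hnd
    simp only [List.foldl_cons]
    rw [pv_step3_mk c2d c2ev keys g hnd q, ih keys _ hnd]
    congr 1
    apply List.map_congr_left
    intro k _
    by_cases hke : k = q.2
    · subst hke
      rw [if_pos rfl, List.filterMap_cons_some (b := q.1) (by simp), List.foldl_cons]
    · rw [if_neg hke, List.filterMap_cons_none (by rw [if_neg (fun h => hke h.symm)])]

-- payload bookkeeping
lemma pv_upd_payload (c2d : PySem.Dict String String) (c2ev : PySem.Dict String (List String)) (c : String) (cs ds os es : List String) :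
    pvUpd c2d c2ev c (pvPayload cs ds os es)
      = pvPayload (cs ++ [c]) (ds ++ (if c2d.contains c then [c2d.getD c ""] else [])) os (es ++ c2ev.getD c []) := by
  by_cases h : c2d.contains c <;> simp [pvUpd, pvPayload, h] <;> rfl

lemma pv_foldl_upd (c2d : PySem.Dict String String) (c2ev : PySem.Dict String (List String)) :
    ∀ (cs l1 l2 os l4 : List String),
    cs.foldl (fun pl c => pvUpd c2d c2ev c pl) (pvPayload l1 l2 os l4)
      = pvPayload (l1 ++ cs)
          (l2 ++ (cs.filter (fun c => c2d.contains c)).map (fun c => c2d.getD c ""))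
          os
          (l4 ++ cs.flatMap (fun c => c2ev.getD c [])) := by
  intro cs
  induction cs with
  | nil => intro l1 l2 os l4; simp
  | cons c t ih =>
    intro l1 l2 os l4
    simp only [List.foldl_cons, pv_upd_payload, ih, List.filter_cons, List.flatMap_cons]
    by_cases h : c2d.contains c <;> simp [h, List.append_assoc]

lemma pv_finalize_payload (cs ds os es : List String) :
    ((((pvPayload cs ds os es).insert "claims" (pvSortedSet ((pvPayload cs ds os es).getD "claims" []))).insert
        "documents" (pvSortedSet ((pvPayload cs ds os es).getD "documents" []))).insert
        "events" (pvSortedSet ((pvPayload cs ds os es).getD "events" []))).items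
      = [("claims", pvSortedSet cs), ("documents", pvSortedSet ds), ("observations", os), ("events", pvSortedSet es)] := by
  rfl

-- membership in A's selected claim list for an entity
lemma pv_mem_sel (rels : List (List (String × String))) (k c : String) :
    c ∈ pvSel rels k ↔ k ∈ (pvC2E rels).getD c [] := by
  have hnd : (pvC2E rels).keys.Nodup := by
    apply pv_nodup_g2
    simp [PySem.Dict.empty]
  unfold pvSel pvOps
  simp only [List.mem_filterMap, List.mem_flatMap, List.mem_map]
  constructor
  · rintro ⟨q, ⟨pr, hpr, e, he, rfl⟩, hq⟩
    dsimp only at hq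
    split_ifs at hq with hek
    · rw [Option.some.injEq] at hq
      have hitems : (c, pr.2) ∈ (pvC2E rels).items := by
        rw [← hq, Prod.mk.eta]; exact hpr
      rw [PySem.Dict.getD_eq_get?_getD,
        (PySem.Dict.get?_eq_some_iff_mem_items _ _ _ hnd).2 hitems]
      exact hek ▸ he
  · intro hm
    rw [PySem.Dict.getD_eq_get?_getD] at hm
    cases hg : (pvC2E rels).get? c with
    | none => rw [hg] at hm; simp at hm
    | some ents =>
      rw [hg] at hm
      refine ⟨(c, k), ⟨(c, ents), (PySem.Dict.get?_eq_some_iff_mem_items _ _ _ hnd).1 hg, k, hm, rfl⟩, by simp⟩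

-- sorted(set(..)) depends only on membership
lemma pv_sortedSet_congr {l1 l2 : List String} (h : ∀ x, x ∈ l1 ↔ x ∈ l2) :
    pvSortedSet l1 = pvSortedSet l2 := by
  unfold pvSortedSet
  apply PySem.List.sorted_eq_sorted_of_perm _ _ _ (fun a b hab => hab)
  rw [List.perm_ext_iff_of_nodup (PySem.Set.nodup_ofList _) (PySem.Set.nodup_ofList _)]
  intro a
  rw [PySem.Set.mem_ofList, PySem.Set.mem_ofList]
  exact h a

-- characterization of port A
lemma pv_portA_char (rels : List (List (String × String))) (ni : List (String × List (String × String))) :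
    build_entity_to_evidence_index rels ni
      = (PySem.Set.ofList (ni.map Prod.fst)).map (fun k =>
          (k, [("claims", pvSortedSet (pvSel rels k)),
               ("documents", pvSortedSet (((pvSel rels k).filter (fun c => (pvC2D rels).contains c)).map (fun c => (pvC2D rels).getD c ""))),
               ("observations", pvSortedSet ((pvE2O rels).getD k [])),
               ("events", pvSortedSet ((pvSel rels k).flatMap (fun c => (pvC2EV rels).getD c [])))])) := by
  unfold build_entity_to_evidence_index
  rw [pv_foldl_relsA]
  show ((pvC2E rels).items.foldl
          (fun ev pr => pr.2.foldl (fun ev e => pvStep3 (pvC2D rels) (pvC2EV rels) ev (pr.1, e)) ev)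
          (ni.foldl (fun ev p => ev.insert p.1 (pvInitP rels p.1)) PySem.Dict.empty)).items.map
        (fun p =>
          (p.1, (((p.2.insert "claims" (pvSortedSet (p.2.getD "claims" []))).insert
                    "documents" (pvSortedSet (p.2.getD "documents" []))).insert
                    "events" (pvSortedSet (p.2.getD "events" []))).items)) = _
  have hev0 : (ni.foldl (fun ev p => ev.insert p.1 (pvInitP rels p.1)) PySem.Dict.empty)
      = PySem.Dict.mk ((PySem.Set.ofList (ni.map Prod.fst)).map (fun k => (k, pvInitP rels k))) := by
    apply PySem.Dict.ext
    exact pv_items_insertKeyFold ni Prod.fst (pvInitP rels) PySem.Dict.empty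
  rw [hev0, pv_foldl_pairfold, pv_mapfold _ _ _ _ _ (PySem.Set.nodup_ofList _)]
  show ((PySem.Set.ofList (ni.map Prod.fst)).map (fun k => (k,
          (pvSel rels k).foldl (fun pl c => pvUpd (pvC2D rels) (pvC2EV rels) c pl) (pvInitP rels k)))).map _ = _
  rw [List.map_map]
  apply List.map_congr_left
  intro k _
  simp only [Function.comp_apply]
  rw [show pvInitP rels k = pvPayload [] [] (pvSortedSet ((pvE2O rels).getD k [])) [] from rfl,
    pv_foldl_upd]
  simp only [List.nil_append]
  rw [pv_finalize_payload]

-- characterization of port B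
lemma pv_portB_char (rels : List (List (String × String))) (ni : List (String × List (String × String))) :
    build_entity_to_evidence_index_alt rels ni
      = (PySem.Set.ofList (ni.map Prod.fst)).map (fun k => (k, pvValB rels k)) := by
  unfold build_entity_to_evidence_index_alt
  show (ni.foldl (fun res p => res.insert p.1 (pvValB rels p.1)) PySem.Dict.empty).items = _
  exact pv_items_insertKeyFold ni Prod.fst (pvValB rels) []

lemma pv_c2_c1 (rel : List (String × String)) (h : pvC2 rel = true) : pvC1 rel = false := by
  unfold pvC1 pvC2 at *
  simp only [Bool.and_eq_true, beq_iff_eq] at h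
  simp [h.1]

lemma pv_c3_c1 (rel : List (String × String)) (h : pvC3 rel = true) : pvC1 rel = false := by
  unfold pvC1 pvC3 at *
  simp only [Bool.and_eq_true, beq_iff_eq] at h
  simp [h.1]

lemma pv_c3_c2 (rel : List (String × String)) (h : pvC3 rel = true) : pvC2 rel = false := by
  unfold pvC2 pvC3 at *
  simp only [Bool.and_eq_true, beq_iff_eq] at h
  simp [h.1]

lemma pv_getD_condModify (P : List (String × String) → Bool) (key val : List (String × String) → String) :
    ∀ (l : List (List (String × String))) (d : PySem.Dict String (List String)) (c : String),
    (l.foldl (fun d rel => if P rel then PySem.Dict.modify d (key rel) [] (· ++ [val rel]) else d) d).getD c []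
      = d.getD c [] ++ l.filterMap (fun rel => if P rel && (key rel == c) then some (val rel) else none) := by
  intro l
  induction l with
  | nil => simp
  | cons rel t ih =>
    intro d c
    simp only [List.foldl_cons, List.filterMap_cons]
    by_cases hP : P rel = true
    · rw [if_pos hP, ih]
      rw [PySem.Dict.getD_modify]
      by_cases hk : c = key rel
      · subst hk
        simp [hP, List.append_assoc]
      · have : (key rel == c) = false := by simp [Ne.symm hk]
        simp [hP, this, hk]
    · simp [hP, ih]

lemma pvG2_shape : pvG2 = fun d rel => if pvC2 rel then PySem.Dict.modify d (pvRelFrom rel) [] (· ++ [pvRelTo rel]) else d := by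
  funext d rel
  unfold pvG2
  by_cases h2 : pvC2 rel = true
  · simp [h2, pv_c2_c1 rel h2]
  · by_cases h1 : pvC1 rel = true <;> simp [h1, h2]

lemma pvG3_shape : pvG3 = fun d rel => if pvC2 rel && PySem.Str.startswith (pvRelTo rel) "EV:" then PySem.Dict.modify d (pvRelFrom rel) [] (· ++ [pvRelTo rel]) else d := by
  funext d rel
  unfold pvG3
  by_cases h2 : pvC2 rel = true
  · by_cases he : PySem.Str.startswith (pvRelTo rel) "EV:" = true <;>
      simp [h2, pv_c2_c1 rel h2]
  · by_cases h1 : pvC1 rel = true <;> simp [h1, h2]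

lemma pvG4_shape : pvG4 = fun d rel => if pvC3 rel then PySem.Dict.modify d (pvRelTo rel) [] (· ++ [pvRelFrom rel]) else d := by
  funext d rel
  unfold pvG4
  by_cases h3 : pvC3 rel = true
  · simp [h3, pv_c3_c1 rel h3, pv_c3_c2 rel h3]
  · by_cases h1 : pvC1 rel = true <;> by_cases h2 : pvC2 rel = true <;> simp [h1, h2, h3]

lemma pv_c2e_getD (rels : List (List (String × String))) (c : String) :
    (pvC2E rels).getD c [] = rels.filterMap (fun rel => if pvC2 rel && (pvRelFrom rel == c) then some (pvRelTo rel) else none) := by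
  unfold pvC2E
  rw [pvG2_shape, pv_getD_condModify pvC2 pvRelFrom pvRelTo]
  simp [PySem.Dict.getD_empty]

lemma pv_c2ev_getD (rels : List (List (String × String))) (c : String) :
    (pvC2EV rels).getD c [] = rels.filterMap (fun rel => if (pvC2 rel && PySem.Str.startswith (pvRelTo rel) "EV:") && (pvRelFrom rel == c) then some (pvRelTo rel) else none) := by
  unfold pvC2EV
  rw [pvG3_shape, pv_getD_condModify (fun rel => pvC2 rel && PySem.Str.startswith (pvRelTo rel) "EV:") pvRelFrom pvRelTo]
  simp [PySem.Dict.getD_empty]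

lemma pv_e2o_getD (rels : List (List (String × String))) (k : String) :
    (pvE2O rels).getD k [] = rels.filterMap (fun rel => if pvC3 rel && (pvRelTo rel == k) then some (pvRelFrom rel) else none) := by
  unfold pvE2O
  rw [pvG4_shape, pv_getD_condModify pvC3 pvRelTo pvRelFrom]
  simp [PySem.Dict.getD_empty]

lemma pv_aboutB_eq (rels : List (List (String × String))) :
    pvAboutB rels = rels.filterMap (fun rel => if pvC2 rel then some (pvRelFrom rel, pvRelTo rel) else none) := by
  unfold pvAboutB pvTriples
  rw [List.filterMap_map]
  rfl

lemma pv_obsB_eq (rels : List (List (String × String))) :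
    pvObsB rels = rels.filterMap (fun rel => if pvC3 rel then some (pvRelTo rel, pvRelFrom rel) else none) := by
  unfold pvObsB pvTriples
  rw [List.filterMap_map]
  rfl

lemma pv_docfold : ∀ (l : List (List (String × String))) (d : PySem.Dict String String),
    ((l.map (fun r => ((PySem.Dict.mk r).getD "type" "", (PySem.Dict.mk r).getD "from" "", (PySem.Dict.mk r).getD "to" ""))).filter
        (fun t => t.1 == "SUPPORTS" && PySem.Str.startswith t.2.1 "DOC:" && PySem.Str.startswith t.2.2 "CLM:")).foldl
      (fun d t => d.insert t.2.2 t.2.1) d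
    = l.foldl pvG1 d := by
  intro l
  induction l with
  | nil => intro d; rfl
  | cons rel t ih =>
    intro d
    simp only [List.map_cons, List.filter_cons]
    by_cases h : pvC1 rel = true
    · rw [if_pos (by exact h), List.foldl_cons, ih, List.foldl_cons]
      unfold pvG1
      rw [if_pos h]
      rfl
    · rw [if_neg (by exact h), ih, List.foldl_cons]
      unfold pvG1
      rw [if_neg h]

lemma pv_docOfB_eq (rels : List (List (String × String))) : pvDocOfB rels = pvC2D rels := by
  unfold pvDocOfB pvTriples pvC2D
  exact pv_docfold rels PySem.Dict.empty

lemma pv_mem_claimsB' (rels : List (List (String × String))) (k c : String) :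
    c ∈ pvClaimsB rels k ↔ k ∈ (pvC2E rels).getD c [] := by
  rw [pv_c2e_getD]
  unfold pvClaimsB
  rw [pv_aboutB_eq, List.filterMap_filterMap]
  simp only [List.mem_filterMap]
  constructor
  · rintro ⟨rel, hrel, hv⟩
    by_cases h2 : pvC2 rel = true
    · simp only [h2, if_true, Option.bind_some] at hv
      split_ifs at hv with hk
      · rw [Option.some.injEq] at hv
        refine ⟨rel, hrel, ?_⟩
        rw [if_pos (by simp [h2, hv]), Option.some.injEq]
        simpa using hk
    · simp [h2] at hv
  · rintro ⟨rel, hrel, hv⟩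
    split_ifs at hv with hc
    · rw [Option.some.injEq] at hv
      simp only [Bool.and_eq_true, beq_iff_eq] at hc
      refine ⟨rel, hrel, ?_⟩
      simp [hc.1, hc.2, hv]

lemma pv_ev_lists (rels : List (List (String × String))) (c : String) :
    (pvC2EV rels).getD c []
      = (pvAboutB rels).filterMap (fun q => if q.1 == c && PySem.Str.startswith q.2 "EV:" then some q.2 else none) := by
  rw [pv_c2ev_getD, pv_aboutB_eq, List.filterMap_filterMap]
  apply List.filterMap_congr
  intro rel _
  by_cases h2 : pvC2 rel = true
  · by_cases hc : pvRelFrom rel = c <;> by_cases he : PySem.Str.startswith (pvRelTo rel) "EV:" = true <;>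
      simp [h2, hc]
  · simp [h2]

lemma pv_obs_lists (rels : List (List (String × String))) (k : String) :
    (pvE2O rels).getD k []
      = (pvObsB rels).filterMap (fun q => if q.1 == k then some q.2 else none) := by
  rw [pv_e2o_getD, pv_obsB_eq, List.filterMap_filterMap]
  apply List.filterMap_congr
  intro rel _
  by_cases h3 : pvC3 rel = true
  · by_cases hk : pvRelTo rel = k <;> simp [h3, hk]
  · simp [h3]

-- ===== VERDICT (by name: the statement is the Claim_ definition above) =====
theorem build_entity_to_evidence_index_spec : Claim_equal_build_entity_to_evidence_index := by
  intro rels ni _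
  show build_entity_to_evidence_index rels ni = build_entity_to_evidence_index_alt rels ni
  rw [pv_portA_char, pv_portB_char]
  apply List.map_congr_left
  intro k _
  have hmem : ∀ c, c ∈ pvClaimsB rels k ↔ c ∈ pvSel rels k := fun c =>
    (pv_mem_claimsB' rels k c).trans (pv_mem_sel rels k c).symm
  have h1 : pvSortedSet (pvSel rels k) = pvSortedSet (pvClaimsB rels k) :=
    pv_sortedSet_congr (fun x => (hmem x).symm)
  have h2 : pvSortedSet (((pvSel rels k).filter (fun c => (pvC2D rels).contains c)).map (fun c => (pvC2D rels).getD c ""))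
      = pvSortedSet (((pvClaimsB rels k).filter (fun c => (pvC2D rels).contains c)).map (fun c => (pvC2D rels).getD c "")) := by
    apply pv_sortedSet_congr
    intro x
    simp only [List.mem_map, List.mem_filter]
    constructor
    · rintro ⟨c, ⟨hc1, hc2⟩, hx⟩
      exact ⟨c, ⟨(hmem c).mpr hc1, hc2⟩, hx⟩
    · rintro ⟨c, ⟨hc1, hc2⟩, hx⟩
      exact ⟨c, ⟨(hmem c).mp hc1, hc2⟩, hx⟩
  have h4 : pvSortedSet ((pvSel rels k).flatMap (fun c => (pvC2EV rels).getD c []))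
      = pvSortedSet ((pvClaimsB rels k).flatMap (fun c =>
          (pvAboutB rels).filterMap (fun q => if q.1 == c && PySem.Str.startswith q.2 "EV:" then some q.2 else none))) := by
    apply pv_sortedSet_congr
    intro x
    simp only [List.mem_flatMap]
    constructor
    · rintro ⟨c, hc, hx⟩
      exact ⟨c, (hmem c).mpr hc, by rw [← pv_ev_lists]; exact hx⟩
    · rintro ⟨c, hc, hx⟩
      exact ⟨c, (hmem c).mp hc, by rw [pv_ev_lists]; exact hx⟩
  unfold pvValB
  rw [pv_docOfB_eq, pv_obs_lists, h1, h2, h4]
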